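-- pv_equiv track=rewrite | github.com/hacefresko/Bagley | src/lib/entities.py | replaceURLencoded
-- ===== SOURCE A (Python) =====
-- def replaceURLencoded(data, match, newValue):
--     if not data:
--         return None
--     new_data = ''
--     for p in data.split('&'):
--         if len(p.split('=')) == 1:
--             return data
--         elif match is None or match.lower() in p.split('=')[0].lower():
--             new_data += p.split('=')[0]
--             new_data += '=' + newValue + '&'
--         else:
--             new_data += p + '&'
--     return new_data[:-1]
-- ===== SOURCE B (Python) =====
-- def replaceURLencoded(data, match, newValue):
--     if not data:
--         return None
--     parts = data.split('&')
--     if any(len(p.split('=')) == 1 for p in parts):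
--         return data
--
--     def repl(p):
--         key = p.split('=')[0]
--         if match is None or match.lower() in key.lower():
--             return key + '=' + newValue
--         return p
--
--     return '&'.join(repl(p) for p in parts)
-- ===== Notes on version B (the rewrite author's own statement) =====
-- stated objective: simpler
-- what changed: Replaces the single accumulator loop with early return and trailing-'&' stripping ([:-1]) by a separate validation pass over the split parts followed by a map over the parts joined with '&'.join, so no separator bookkeeping is needed.
import Mathlib
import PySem

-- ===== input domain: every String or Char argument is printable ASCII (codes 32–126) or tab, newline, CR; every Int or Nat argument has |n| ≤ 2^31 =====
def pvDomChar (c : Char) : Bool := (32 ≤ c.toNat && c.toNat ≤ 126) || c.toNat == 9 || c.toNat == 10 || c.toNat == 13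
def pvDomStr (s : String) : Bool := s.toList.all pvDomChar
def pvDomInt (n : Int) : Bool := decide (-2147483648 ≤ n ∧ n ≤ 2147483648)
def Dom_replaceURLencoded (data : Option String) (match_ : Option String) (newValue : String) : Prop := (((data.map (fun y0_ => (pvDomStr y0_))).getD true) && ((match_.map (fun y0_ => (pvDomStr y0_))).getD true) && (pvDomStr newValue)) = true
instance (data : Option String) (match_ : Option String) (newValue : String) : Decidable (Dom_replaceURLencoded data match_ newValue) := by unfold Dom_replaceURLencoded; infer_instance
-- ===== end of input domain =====

-- B replaces A's accumulator loop (early return + trailing-'&' strip) by a validation pass then a map joined with '&' (objective: simpler).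

-- ===== PORT A =====
-- the 'for p in data.split('&')' loop: accumulator new_data, early 'return data', final new_data[:-1]
def replALoop (d : List Char) (m? : Option (List Char)) (nv : List Char) :
    List (List Char) → List Char → List Char
  | [], acc => PySem.Chars.slice acc none (some (-1))              -- return new_data[:-1]
  | p :: rest, acc =>
    let ps := (PySem.Chars.split? p ['=']).getD []                 -- p.split('=')  (sep nonempty, never raises)
    if ps.length == 1 then d                                       -- return data
    else if (match m? with
             | none => true
             | some m => PySem.Chars.isIn (PySem.Chars.lower m) (PySem.Chars.lower (ps.headD []))) then
      replALoop d m? nv rest (acc ++ ps.headD [] ++ '=' :: nv ++ ['&'])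
    else
      replALoop d m? nv rest (acc ++ p ++ ['&'])

def replaceURLencoded (data : Option String) (match_ : Option String) (newValue : String) : Option String :=
  match data with
  | none => none
  | some d =>
    if d = "" then none                                            -- 'if not data: return None'
    else some (String.ofList (replALoop d.toList (match_.map String.toList) newValue.toList
        ((PySem.Chars.split? d.toList ['&']).getD []) []))

-- ===== PORT B =====
-- repl(p) from Source B
def replBRepl (m? : Option (List Char)) (nv : List Char) (p : List Char) : List Char :=
  let key := ((PySem.Chars.split? p ['=']).getD []).headD []       -- p.split('=')[0]
  if (match m? with
      | none => true
      | some m => PySem.Chars.isIn (PySem.Chars.lower m) (PySem.Chars.lower key)) then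
    key ++ '=' :: nv
  else p

def replaceURLencoded_alt (data : Option String) (match_ : Option String) (newValue : String) : Option String :=
  match data with
  | none => none
  | some d =>
    if d = "" then none
    else
      let parts := (PySem.Chars.split? d.toList ['&']).getD []
      if parts.any (fun p => ((PySem.Chars.split? p ['=']).getD []).length == 1) then some d
      else some (String.ofList (PySem.Chars.join ['&']
        (parts.map (replBRepl (match_.map String.toList) newValue.toList))))

-- ===== PRECONDITION & SPEC =====
def Spec_replaceURLencoded (data : Option String) (match_ : Option String) (newValue : String) (out : Option String) : Prop := out = replaceURLencoded_alt data match_ newValue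
instance (data : Option String) (match_ : Option String) (newValue : String) (out : Option String) : Decidable (Spec_replaceURLencoded data match_ newValue out) := by unfold Spec_replaceURLencoded; infer_instance

-- ===== CLAIM (what is proved, stated in full; the proofs are below) =====
def Claim_equal_replaceURLencoded : Prop := ∀ (data : Option String) (match_ : Option String) (newValue : String), Dom_replaceURLencoded data match_ newValue → Spec_replaceURLencoded data match_ newValue (replaceURLencoded data match_ newValue)

-- ===== LEMMAS AND PROOFS =====

theorem splitOn_go_ne_nil (sep : List Char) :
    ∀ (fuel : Nat) (l cur : List Char) (acc : List (List Char)),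
    PySem.Chars.splitOn.go sep fuel l cur acc ≠ [] := by
  intro fuel
  induction fuel with
  | zero => intro l cur acc; simp [PySem.Chars.splitOn.go]
  | succ n ih =>
    intro l cur acc
    cases l with
    | nil => simp [PySem.Chars.splitOn.go]
    | cons c rest =>
      rw [PySem.Chars.splitOn.go]
      split_ifs <;> apply ih

theorem splitOn_ne_nil (s sep : List Char) : PySem.Chars.splitOn s sep ≠ [] := by
  unfold PySem.Chars.splitOn; apply splitOn_go_ne_nil

theorem loopA_eq (d : List Char) (m? : Option (List Char)) (nv : List Char) :
    ∀ (parts : List (List Char)) (acc : List Char),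
    replALoop d m? nv parts acc =
      if parts.any (fun p => ((PySem.Chars.split? p ['=']).getD []).length == 1) then d
      else (acc ++ (parts.map (fun p => replBRepl m? nv p ++ ['&'])).flatten).dropLast := by
  intro parts
  induction parts with
  | nil =>
    intro acc
    simp [replALoop, PySem.List.slice_to_neg_one]
  | cons p rest ih =>
    intro acc
    simp only [replALoop]
    by_cases hbad : ((PySem.Chars.split? p ['=']).getD []).length = 1
    · simp [hbad]
    · cases m? with
      | none => simp [hbad, ih, replBRepl, List.append_assoc]
      | some m =>
        by_cases hc : PySem.Chars.isIn (PySem.Chars.lower m)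
            (PySem.Chars.lower (((PySem.Chars.split? p ['=']).getD []).head?.getD [])) = true
        · simp [hbad, hc, ih, replBRepl, List.append_assoc]
        · simp [hbad, hc, ih, replBRepl, List.append_assoc]

theorem flatten_eq_join (m? : Option (List Char)) (nv : List Char) :
    ∀ (parts : List (List Char)), parts ≠ [] →
    (parts.map (fun p => replBRepl m? nv p ++ ['&'])).flatten =
      PySem.Chars.join ['&'] (parts.map (replBRepl m? nv)) ++ ['&'] := by
  intro parts
  induction parts with
  | nil => intro h; exact absurd rfl h
  | cons p rest ih =>
    intro _
    cases rest with
    | nil => simp [PySem.Chars.join_singleton]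
    | cons q t =>
      have h := ih (by simp)
      simp only [List.map_cons, List.flatten_cons] at h ⊢
      rw [h, PySem.Chars.join_cons_cons]
      simp [List.append_assoc]

-- ===== VERDICT (by name: the statement is the Claim_ definition above) =====
theorem replaceURLencoded_spec : Claim_equal_replaceURLencoded := by
  intro data match_ newValue _
  unfold Spec_replaceURLencoded
  cases data with
  | none => rfl
  | some d =>
    by_cases hd : d = ""
    · simp [replaceURLencoded, replaceURLencoded_alt, hd]
    · simp only [replaceURLencoded, replaceURLencoded_alt, if_neg hd]
      rw [loopA_eq]
      by_cases hb : ((PySem.Chars.split? d.toList ['&']).getD []).any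
          (fun p => ((PySem.Chars.split? p ['=']).getD []).length == 1)
      · simp [hb]
      · rw [if_neg (by simp [hb]), if_neg (by simp [hb]), List.nil_append,
          flatten_eq_join _ _ _ (by simp [PySem.Chars.split?, splitOn_ne_nil]),
          List.dropLast_concat]
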